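-- pv_equiv track=rewrite | github.com/photoarchive2004-beep/idea_pipl_stB | tools/run_c1.py | sort_pdf_candidates
-- ===== SOURCE A (Python) =====
-- from typing import Any, Dict, Iterable, List, Optional, Tuple
--
-- def classify_pdf_url(url: str) -> str:
--     u = (url or "").lower()
--     high_tokens = ["pmc", "pubmedcentral", "arxiv.org", "zenodo.org", "hal.science", "repository", "eprints", "figshare", "osf.io"]
--     low_tokens = ["sciencedirect", "wiley", "oup", "elsevier", "springer", "nature.com", "tandfonline", "linkinghub", "pdfdirect"]
--     if any(t in u for t in high_tokens):
--         return "HIGH"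
--     if any(t in u for t in low_tokens):
--         return "LOW"
--     if u:
--         return "MED"
--     return "NONE"
--
-- def sort_pdf_candidates(urls: List[str]) -> List[str]:
--     priority = {"HIGH": 0, "MED": 1, "LOW": 2, "NONE": 3}
--     uniq, seen = [], set()
--     for x in urls:
--         if x and x not in seen:
--             seen.add(x)
--             uniq.append(x)
--     return sorted(uniq, key=lambda x: (priority.get(classify_pdf_url(x), 3), x))
-- ===== SOURCE B (Python) =====
-- def classify_pdf_url(url: str) -> str:
--     u = (url or "").lower()
--     high_tokens = ["pmc", "pubmedcentral", "arxiv.org", "zenodo.org", "hal.science", "repository", "eprints", "figshare", "osf.io"]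
--     low_tokens = ["sciencedirect", "wiley", "oup", "elsevier", "springer", "nature.com", "tandfonline", "linkinghub", "pdfdirect"]
--     if any(t in u for t in high_tokens):
--         return "HIGH"
--     if any(t in u for t in low_tokens):
--         return "LOW"
--     if u:
--         return "MED"
--     return "NONE"
--
-- def sort_pdf_candidates(urls):
--     uniq = list(dict.fromkeys(u for u in urls if u))
--     def bucket(cls):
--         return sorted(u for u in uniq if classify_pdf_url(u) == cls)
--     return bucket("HIGH") + bucket("MED") + bucket("LOW")
-- ===== Notes on version B (the rewrite author's own statement) =====
-- stated objective: alternative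
-- what changed: Replaces the single composite-key (priority, url) sort of a fold-built dedup list by dict.fromkeys dedup followed by a three-way bucket partition (HIGH/MED/LOW via classify_pdf_url) with each bucket sorted lexicographically and concatenated in priority order.
import Mathlib
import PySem

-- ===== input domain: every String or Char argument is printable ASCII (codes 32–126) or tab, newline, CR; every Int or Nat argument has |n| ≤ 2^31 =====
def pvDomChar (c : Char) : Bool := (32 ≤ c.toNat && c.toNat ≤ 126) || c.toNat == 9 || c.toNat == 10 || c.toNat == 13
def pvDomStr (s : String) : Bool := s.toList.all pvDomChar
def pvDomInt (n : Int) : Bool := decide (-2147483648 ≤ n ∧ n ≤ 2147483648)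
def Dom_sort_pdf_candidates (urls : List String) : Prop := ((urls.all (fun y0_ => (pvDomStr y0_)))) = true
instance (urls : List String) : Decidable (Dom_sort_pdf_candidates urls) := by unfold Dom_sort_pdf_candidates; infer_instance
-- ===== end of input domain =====

-- B replaces A's single composite-key (priority, url) sort of a fold-built dedup list by a
-- dict.fromkeys dedup followed by a HIGH/MED/LOW bucket partition, each bucket sorted
-- lexicographically and concatenated in priority order (objective: alternative decomposition).

-- ===== PORT A =====
-- shared module helper (identical in Source A and Source B); '(url or "")' equals url for strings
def classify_pdf_url (url : String) : String :=
  let u := PySem.Str.lower url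
  let high_tokens : List String := ["pmc", "pubmedcentral", "arxiv.org", "zenodo.org", "hal.science", "repository", "eprints", "figshare", "osf.io"]
  let low_tokens : List String := ["sciencedirect", "wiley", "oup", "elsevier", "springer", "nature.com", "tandfonline", "linkinghub", "pdfdirect"]
  if high_tokens.any (fun t => PySem.Str.isIn t u) then "HIGH"
  else if low_tokens.any (fun t => PySem.Str.isIn t u) then "LOW"
  else if u ≠ "" then "MED"
  else "NONE"

def sort_pdf_candidates (urls : List String) : List String :=
  let priority : PySem.Dict String Int :=
    PySem.Dict.ofList [("HIGH", 0), ("MED", 1), ("LOW", 2), ("NONE", 3)]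
  let st := urls.foldl
    (fun (acc : List String × PySem.Set String) x =>
      if x ≠ "" ∧ x ∉ acc.2 then (acc.1 ++ [x], PySem.Set.add acc.2 x) else acc)
    ([], PySem.Set.empty)
  PySem.List.sorted2 st.1 (fun x => priority.getD (classify_pdf_url x) 3) (fun x => x) false

-- ===== PORT B =====
def pvBucket (uniq : List String) (cls : String) : List String :=
  PySem.List.sorted (uniq.filter (fun u => classify_pdf_url u == cls)) (fun x => x)

def sort_pdf_candidates_alt (urls : List String) : List String :=
  let uniq := PySem.List.dedup (urls.filter (fun u => u ≠ ""))
  pvBucket uniq "HIGH" ++ pvBucket uniq "MED" ++ pvBucket uniq "LOW"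

-- ===== PRECONDITION & SPEC =====
def Spec_sort_pdf_candidates (urls : List String) (out : List String) : Prop := out = sort_pdf_candidates_alt urls
instance (urls : List String) (out : List String) : Decidable (Spec_sort_pdf_candidates urls out) := by unfold Spec_sort_pdf_candidates; infer_instance

-- ===== CLAIM (what is proved, stated in full; the proofs are below) =====
def Claim_equal_sort_pdf_candidates : Prop := ∀ (urls : List String), Dom_sort_pdf_candidates urls → Spec_sort_pdf_candidates urls (sort_pdf_candidates urls)

-- ===== LEMMAS AND PROOFS =====

-- the priority of a classification, as A's dict lookup computes it
def pvPrio (c : String) : Int :=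
  (PySem.Dict.ofList [("HIGH", (0:Int)), ("MED", 1), ("LOW", 2), ("NONE", 3)]).getD c 3

-- A's composite sort key
def pvKey (x : String) : Lex (Int × String) := toLex (pvPrio (classify_pdf_url x), x)

lemma classify_cases (u : String) (hu : u ≠ "") :
    classify_pdf_url u = "HIGH" ∨ classify_pdf_url u = "LOW" ∨ classify_pdf_url u = "MED" := by
  have hl : PySem.Str.lower u ≠ "" := by
    intro h
    apply hu
    have h2 := congrArg String.toList h
    rw [PySem.Str.toList_lower] at h2
    simp [PySem.Chars.lower] at h2
    exact h2
  unfold classify_pdf_url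
  dsimp only
  split_ifs <;> simp_all

lemma foldA (l : List String) (s : PySem.Set String) (hs : s.Nodup) :
    l.foldl
      (fun (acc : List String × PySem.Set String) x =>
        if x ≠ "" ∧ x ∉ acc.2 then (acc.1 ++ [x], PySem.Set.add acc.2 x) else acc)
      (s, s)
    = (PySem.Set.update s (l.filter (fun x => x ≠ "")),
       PySem.Set.update s (l.filter (fun x => x ≠ ""))) := by
  induction l generalizing s with
  | nil => rw [List.filter_nil, PySem.Set.update_nil, List.foldl_nil]
  | cons x l ih =>
    by_cases hx : x = ""
    · rw [List.filter_cons_of_neg (by simp [hx]), List.foldl_cons, if_neg (by simp [hx])]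
      exact ih s hs
    · rw [List.filter_cons_of_pos (by simp [hx]), PySem.Set.update_cons, List.foldl_cons]
      by_cases hm : x ∈ s
      · rw [if_neg (by simp [hx, hm]), PySem.Set.add_of_mem hm]
        exact ih s hs
      · have hadd : PySem.Set.add s x = s ++ [x] := PySem.Set.add_of_not_mem hm
        have hnd2 : (PySem.Set.add s x).Nodup := by
          rw [hadd]
          simp [List.nodup_append, hs]
          exact fun a ha he => hm (he ▸ ha)
        rw [if_pos ⟨hx, hm⟩]
        show List.foldl _ (s ++ [x], PySem.Set.add s x) l = _
        rw [← hadd]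
        exact ih (PySem.Set.add s x) hnd2

lemma sorted2_eq_sorted_toLex (xs : List String) (k1 : String → Int) :
    PySem.List.sorted2 xs k1 (fun x => x) false
      = PySem.List.sorted xs (fun x => toLex (k1 x, x)) := by
  rw [PySem.List.sorted_eq_foldl_insertBy]
  show List.foldl (fun acc x => PySem.List.insertBy _ x acc) [] xs = _
  congr 1
  funext acc x
  congr 1
  funext a b
  rcases lt_trichotomy (k1 a) (k1 b) with h | h | h
  · simp [Prod.Lex.toLex_lt_toLex, h]
  · simp [Prod.Lex.toLex_lt_toLex, h]
  · simp [Prod.Lex.toLex_lt_toLex, h, not_lt_of_gt h, ne_of_gt h]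

lemma bucket_mem {uniq : List String} {c x : String} (hx : x ∈ pvBucket uniq c) :
    classify_pdf_url x = c ∧ x ∈ uniq := by
  unfold pvBucket at hx
  rw [PySem.List.mem_sorted] at hx
  simp [List.mem_filter] at hx
  exact ⟨hx.2, hx.1⟩

lemma bucket_pairwise_key (uniq : List String) (hnd : uniq.Nodup) (c : String) :
    List.Pairwise (fun a b => pvKey a < pvKey b) (pvBucket uniq c) := by
  have hpw : List.Pairwise (fun a b : String => a ≤ b) (pvBucket uniq c) := by
    simpa using PySem.List.sorted_pairwise (uniq.filter (fun u => classify_pdf_url u == c)) (fun x => x)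
  have hbnd : (pvBucket uniq c).Nodup :=
    ((PySem.List.sorted_perm (uniq.filter (fun u => classify_pdf_url u == c)) (fun x : String => x) false).nodup_iff).mpr (hnd.filter _)
  refine List.Pairwise.imp_of_mem ?_ (hpw.and hbnd)
  intro a b ha hb hab
  have hca := (bucket_mem ha).1
  have hcb := (bucket_mem hb).1
  unfold pvKey
  rw [hca, hcb]
  exact Prod.Lex.toLex_lt_toLex.mpr (Or.inr ⟨rfl, lt_of_le_of_ne hab.1 hab.2⟩)

lemma cross_key {uniq : List String} {c₁ c₂ a b : String}
    (ha : a ∈ pvBucket uniq c₁) (hb : b ∈ pvBucket uniq c₂)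
    (hp : pvPrio c₁ < pvPrio c₂) : pvKey a < pvKey b := by
  unfold pvKey
  rw [(bucket_mem ha).1, (bucket_mem hb).1]
  exact Prod.Lex.toLex_lt_toLex.mpr (Or.inl hp)

lemma buckets_perm (uniq : List String) (hne : ∀ x ∈ uniq, x ≠ "") :
    (pvBucket uniq "HIGH" ++ pvBucket uniq "MED" ++ pvBucket uniq "LOW").Perm uniq := by
  have hH := PySem.List.sorted_perm (uniq.filter (fun u => classify_pdf_url u == "HIGH")) (fun x : String => x) false
  have hM := PySem.List.sorted_perm (uniq.filter (fun u => classify_pdf_url u == "MED")) (fun x : String => x) false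
  have hL := PySem.List.sorted_perm (uniq.filter (fun u => classify_pdf_url u == "LOW")) (fun x : String => x) false
  have h1 : (pvBucket uniq "HIGH" ++ pvBucket uniq "MED" ++ pvBucket uniq "LOW").Perm
      (uniq.filter (fun u => classify_pdf_url u == "HIGH") ++ uniq.filter (fun u => classify_pdf_url u == "MED")
        ++ uniq.filter (fun u => classify_pdf_url u == "LOW")) :=
    ((hH.append hM).append hL)
  refine h1.trans ?_
  rw [List.append_assoc]
  have hMf : List.filter (fun u => classify_pdf_url u == "MED") uniq
      = List.filter (fun u => (classify_pdf_url u == "MED") && !(classify_pdf_url u == "HIGH")) uniq := by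
    refine (List.filter_congr ?_).symm
    intro x hx
    rcases classify_cases x (hne x hx) with h | h | h <;> simp [h]
  have hLf : List.filter (fun u => classify_pdf_url u == "LOW") uniq
      = List.filter (fun u => !(classify_pdf_url u == "MED") && !(classify_pdf_url u == "HIGH")) uniq := by
    refine (List.filter_congr ?_).symm
    intro x hx
    rcases classify_cases x (hne x hx) with h | h | h <;> simp [h]
  rw [hMf, hLf, ← List.filter_filter, ← List.filter_filter]
  exact (List.Perm.append_left _ (List.filter_append_perm _ _)).trans (List.filter_append_perm _ uniq)

lemma main_eq (urls : List String) :
    sort_pdf_candidates urls = sort_pdf_candidates_alt urls := by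
  unfold sort_pdf_candidates sort_pdf_candidates_alt
  dsimp only
  simp only [PySem.Set.empty]
  rw [foldA urls [] List.nodup_nil, PySem.Set.update_nil_left, PySem.List.dedup_eq_ofList,
      sorted2_eq_sorted_toLex]
  show PySem.List.sorted _ pvKey = _
  set uniq := PySem.Set.ofList (urls.filter (fun u => u ≠ "")) with huniq
  have hne : ∀ x ∈ uniq, x ≠ "" := by
    intro x hx
    rw [huniq, PySem.Set.mem_ofList] at hx
    simpa using (List.mem_filter.mp hx).2
  have hnd : uniq.Nodup := PySem.Set.nodup_ofList _
  apply PySem.List.sorted_eq_of_perm_of_pairwise_lt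
  · exact buckets_perm uniq hne
  · rw [List.pairwise_append, List.pairwise_append]
    refine ⟨⟨bucket_pairwise_key uniq hnd "HIGH", bucket_pairwise_key uniq hnd "MED", ?_⟩,
            bucket_pairwise_key uniq hnd "LOW", ?_⟩
    · intro a ha b hb
      exact cross_key ha hb (by decide)
    · intro a ha b hb
      rcases List.mem_append.mp ha with h | h
      · exact cross_key h hb (by decide)
      · exact cross_key h hb (by decide)

-- ===== VERDICT (by name: the statement is the Claim_ definition above) =====
theorem sort_pdf_candidates_spec : Claim_equal_sort_pdf_candidates := by
  intro urls _
  unfold Spec_sort_pdf_candidates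
  exact main_eq urls
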